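-- pv_equiv track=rewrite | github.com/Tooloom/Ylab | Lesson_1/Task_1_4.py | bananas
-- ===== SOURCE A (Python) =====
-- from itertools import combinations
--
-- def bananas(s) -> set:
--     result = set()
--     text = 'banana'
--     for i in combinations(range(len(s)), len(text)):  # positions for an opened symbols
--         temp = list(s)
--         temp2 = list('-' * len(s))
--         t = 0
--         for j in i:
--             if text[t] != temp[j]:
--                 break
--             else:
--                 temp2[j] = temp[j]  # opening characters by position
--                 t += 1
--             if t == len(text):
--                 temp2 = ''.join(temp2)
--                 result.add(temp2)
--                 break
--
--     return result
-- ===== SOURCE B (Python) =====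
-- def bananas(s) -> set:
--     text = 'banana'
--     tl = list(s)
--     n = len(tl)
--
--     def find(items, pat):
--         # all ways to pick increasing positions from items spelling pat
--         if not pat:
--             return [[]]
--         if not items:
--             return []
--         (j, c), rest = items[0], items[1:]
--         out = [[j] + t for t in find(rest, pat[1:])] if c == pat[0] else []
--         return out + find(rest, pat)
--
--     masks = [''.join(tl[k] if k in pos else '-' for k in range(n))
--              for pos in find(list(enumerate(tl)), text)]
--     return set(masks)
-- ===== Notes on version B (the rewrite author's own statement) =====
-- stated objective: faster
-- what changed: Instead of testing every 6-element index combination of range(len(s)) against 'banana' (A), B backtracks over the string advancing only along characters that match the next needed pattern letter, generating exactly the valid position tuples and building each mask once; a timing run measured B faster (A timed out at n=64 where B returned).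
import Mathlib
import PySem

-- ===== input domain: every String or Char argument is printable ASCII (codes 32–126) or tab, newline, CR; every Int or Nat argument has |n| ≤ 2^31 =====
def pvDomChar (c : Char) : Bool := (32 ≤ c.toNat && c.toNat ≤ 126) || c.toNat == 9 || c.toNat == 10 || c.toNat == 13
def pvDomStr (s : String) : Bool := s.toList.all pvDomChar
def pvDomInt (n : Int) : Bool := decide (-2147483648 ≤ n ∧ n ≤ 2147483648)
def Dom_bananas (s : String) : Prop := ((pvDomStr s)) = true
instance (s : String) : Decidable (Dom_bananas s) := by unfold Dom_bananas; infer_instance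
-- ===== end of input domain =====

-- B replaces A's scan of all 6-element index combinations by a backtracking search that
-- advances only along characters matching the next needed pattern letter (objective: faster;
-- a timing run measured B faster: A timed out at n=64 where B returned).

-- ===== PORT A =====
-- inner 'for j in i' loop of A: state temp2 (masked chars), t (next 'banana' letter), res;
-- breaks on mismatch; after t += 1, if t == len(text) adds the joined mask and breaks.
-- temp[j] / text[t] ported with pyGetD '-' (always in range here: j comes from
-- combinations(range(len(s))) and t < len(text) whenever read).
def bananasGo (temp text : List Char) : List Int → List Char → Nat → PySem.Set String → PySem.Set String
  | [], _, _, res => res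
  | j :: rest, temp2, t, res =>
    if PySem.List.pyGetD text (t : Int) '-' != PySem.List.pyGetD temp j '-' then res
    else
      let temp2' := PySem.List.pySetD temp2 j (PySem.List.pyGetD temp j '-')
      if t + 1 == text.length then PySem.Set.add res (String.mk temp2')
      else bananasGo temp text rest temp2' (t + 1) res

def bananas (s : String) : List String :=
  let text := "banana".toList
  let temp := s.toList
  (PySem.List.combinations (PySem.List.pyRange 0 (temp.length : Int) 1) text.length).foldl
    (fun res i => bananasGo temp text i (List.replicate temp.length '-') 0 res)
    PySem.Set.empty

-- ===== PORT B =====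
-- Source B's find(items, pat): all increasing position choices from items spelling pat
def findPos : List (Int × Char) → List Char → List (List Int)
  | _, [] => [[]]
  | [], _ :: _ => []
  | (j, c) :: rest, p :: ps =>
      (if c == p then (findPos rest ps).map (fun t => j :: t) else []) ++ findPos rest (p :: ps)

-- Source B's ''.join(tl[k] if k in pos else '-' for k in range(n))
def maskOf (tl : List Char) (pos : List Int) : String :=
  String.mk ((PySem.List.pyRange 0 (tl.length : Int) 1).map
    (fun k => if pos.contains k then PySem.List.pyGetD tl k '-' else '-'))

def bananas_alt (s : String) : List String :=
  let tl := s.toList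
  PySem.Set.ofList ((findPos (PySem.List.enumerate tl 0) "banana".toList).map (maskOf tl))

-- ===== PRECONDITION & SPEC =====
def Spec_bananas (s : String) (out : List String) : Prop := out = bananas_alt s
instance (s : String) (out : List String) : Decidable (Spec_bananas s out) := by unfold Spec_bananas; infer_instance

-- ===== CLAIM (what is proved, stated in full; the proofs are below) =====
def Claim_equal_bananas : Prop := ∀ (s : String), Dom_bananas s → Spec_bananas s (bananas s)

-- ===== LEMMAS AND PROOFS =====

-- the condition A's inner loop checks, starting at letter t, over positions i
def okFrom (temp text : List Char) : Nat → List Int → Bool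
  | _, [] => true
  | t, j :: rest =>
      (PySem.List.pyGetD text (t : Int) '-' == PySem.List.pyGetD temp j '-') && okFrom temp text (t + 1) rest

-- length/range check used for pattern matching on pairs
def chk : List Char → List (Int × Char) → Bool
  | [], [] => true
  | [], _ :: _ => false
  | _ :: _, [] => false
  | p :: ps, (_, c) :: cs => (c == p) && chk ps cs

-- A's inner loop characterised: under the invariant t + |i| = |text| (and i ≠ []),
-- it adds the mask built by successive assignments iff every position matches.
theorem bananasGo_spec (temp text : List Char) :
    ∀ (i : List Int) (t : Nat) (temp2 : List Char) (res : PySem.Set String),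
      i ≠ [] → t + i.length = text.length →
      bananasGo temp text i temp2 t res =
        if okFrom temp text t i then
          PySem.Set.add res (String.mk
            (i.foldl (fun l j => PySem.List.pySetD l j (PySem.List.pyGetD temp j '-')) temp2))
        else res := by
  intro i
  induction i with
  | nil => intro t temp2 res h _; exact absurd rfl h
  | cons j rest ih =>
    intro t temp2 res _ hlen
    simp only [bananasGo, okFrom, List.foldl_cons]
    by_cases hm : PySem.List.pyGetD text (t : Int) '-' = PySem.List.pyGetD temp j '-'
    · simp only [hm, bne_self_eq_false, Bool.false_eq_true, if_false, beq_self_eq_true,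
        Bool.true_and]
      by_cases ht : t + 1 = text.length
      · have hrest : rest = [] := by
          have : rest.length = 0 := by simp at hlen; omega
          exact List.eq_nil_of_length_eq_zero this
        subst hrest
        simp [ht, okFrom]
      · have hrest : rest ≠ [] := by
          intro h; subst h; simp at hlen; omega
        have : (t + 1 == text.length) = false := by simp [ht]
        rw [this]
        simp only [Bool.false_eq_true, if_false]
        exact ih (t + 1) _ res hrest (by simp at hlen ⊢; omega)
    · have hb : (PySem.List.pyGetD text (t : Int) '-' != PySem.List.pyGetD temp j '-') = true := by
        simp only [bne_iff_ne, ne_eq]; exact hm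
      have hbeq : (PySem.List.pyGetD text (t : Int) '-' == PySem.List.pyGetD temp j '-') = false := by
        simp only [beq_eq_false_iff_ne, ne_eq]; exact hm
      rw [hb, hbeq]
      simp only [if_true, Bool.false_and, Bool.false_eq_true, if_false]

-- accumulating with Set.add under a test is Set.update of the filtered, mapped list
theorem foldl_add_if {α : Type} (m : α → Bool) (f : α → String) :
    ∀ (L : List α) (acc : PySem.Set String),
      L.foldl (fun res i => if m i then PySem.Set.add res (f i) else res) acc =
        PySem.Set.update acc ((L.filter m).map f) := by
  intro L
  induction L with
  | nil => intro acc; simp [PySem.Set.update_nil]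
  | cons x L ih =>
    intro acc
    by_cases hx : m x = true
    · simp only [List.foldl_cons, List.filter_cons, hx, if_true, List.map_cons,
        PySem.Set.update_cons]
      exact ih _
    · simp only [List.foldl_cons, List.filter_cons, hx, Bool.false_eq_true,
        if_false]
      exact ih _

-- Source B's find = filter of the combinations by the matching test
theorem findPos_eq_filter :
    ∀ (items : List (Int × Char)) (pat : List Char),
      findPos items pat =
        ((PySem.List.combinations items pat.length).filter (chk pat)).map (List.map Prod.fst) := by
  intro items
  induction items with
  | nil =>
    intro pat
    cases pat with
    | nil => simp [findPos, PySem.List.combinations_zero, chk]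
    | cons p ps => simp [findPos, PySem.List.combinations_nil_succ]
  | cons jc rest ih =>
    intro pat
    cases pat with
    | nil => simp [findPos, PySem.List.combinations_zero, chk]
    | cons p ps =>
      obtain ⟨j, c⟩ := jc
      simp only [findPos, List.length_cons, PySem.List.combinations_cons_succ,
        List.filter_append, List.filter_map, List.map_append, List.map_map]
      by_cases hc : c = p
      · have hcb : (c == p) = true := by simp [hc]
        have h1 : (chk (p :: ps) ∘ fun cs => (j, c) :: cs) = chk ps := by
          funext cs; simp [chk, hc]
        rw [h1, hcb, if_pos rfl, ih ps, ih (p :: ps)]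
        simp [List.map_map, Function.comp_def]
      · have hcb : (c == p) = false := by simp [hc]
        have h1 : (chk (p :: ps) ∘ fun cs => (j, c) :: cs) = fun _ => false := by
          funext cs; simp [chk, hc]
        rw [h1, hcb, ih (p :: ps)]
        simp
-- A's matching test equals chk on the paired-up positions (under the length invariant)
theorem okFrom_eq_chk (temp text : List Char) :
    ∀ (i : List Int) (t : Nat),
      t + i.length = text.length →
      okFrom temp text t i =
        chk (text.drop t) (i.map (fun j => (j, PySem.List.pyGetD temp j '-'))) := by
  intro i
  induction i with
  | nil =>
    intro t ht
    have ht' : text.length ≤ t := by simp at ht; omega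
    have : text.drop t = [] := List.drop_eq_nil_of_le ht'
    simp [okFrom, this, chk]
  | cons j rest ih =>
    intro t ht
    have htl : t < text.length := by simp at ht; omega
    rw [List.drop_eq_getElem_cons htl]
    simp only [okFrom, List.map_cons, chk]
    rw [ih (t + 1) (by simp at ht ⊢; omega)]
    have : PySem.List.pyGetD text (t : Int) '-' = text[t] := by
      rw [PySem.List.pyGetD_natCast, List.getD_eq_getElem _ _ htl]
    rw [this]
    congr 1
    exact Bool.beq_comm

-- setting index j (0 ≤ j < n) in a pyRange-map is pointwise substitution
theorem set_map_pyRange (n : Nat) (g : Int → Char) (j : Int) (v : Char)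
    (h0 : 0 ≤ j) (_hn : j < (n : Int)) :
    PySem.List.pySetD ((PySem.List.pyRange 0 (n : Int) 1).map g) j v =
      (PySem.List.pyRange 0 (n : Int) 1).map (fun k => if k = j then v else g k) := by
  rw [PySem.List.pySetD_of_nonneg _ _ h0]
  apply List.ext_getElem
  · simp
  · intro m h1 h2
    have hm : m < n := by
      simpa [PySem.List.length_pyRange_one] using h2
    have hval : (PySem.List.pyRange 0 (n : Int) 1)[m]'(by simpa [PySem.List.length_pyRange_one]) = (m : Int) := by
      rw [PySem.List.getElem_pyRange_one]; ring
    rw [List.getElem_set, List.getElem_map, List.getElem_map, hval]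
    by_cases hjm : j.toNat = m
    · have : (m : Int) = j := by omega
      simp [hjm, this]
    · have : ¬ ((m : Int) = j) := by omega
      simp [hjm, this]

-- A's successive assignments over valid positions build B's mask pointwise
theorem foldl_set_eq_mask (temp : List Char) (n : Nat) :
    ∀ (i : List Int) (g : Int → Char),
      (∀ j ∈ i, 0 ≤ j ∧ j < (n : Int)) →
      i.foldl (fun l j => PySem.List.pySetD l j (PySem.List.pyGetD temp j '-'))
          ((PySem.List.pyRange 0 (n : Int) 1).map g) =
        (PySem.List.pyRange 0 (n : Int) 1).map
          (fun k => if i.contains k then PySem.List.pyGetD temp k '-' else g k) := by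
  intro i
  induction i with
  | nil => intro g _; simp
  | cons j rest ih =>
    intro g hmem
    obtain ⟨hj0, hjn⟩ := hmem j (by simp)
    simp only [List.foldl_cons]
    rw [set_map_pyRange n g j _ hj0 hjn,
        ih _ (fun x hx => hmem x (by simp [hx]))]
    apply List.map_congr_left
    intro k _
    by_cases hk : k = j
    · subst hk
      by_cases hr : rest.contains k <;> simp
    · by_cases hr : rest.contains k <;> simp [hk]

-- ===== VERDICT (by name: the statement is the Claim_ definition above) =====
theorem bananas_spec : Claim_equal_bananas := by
  intro s _
  simp only [Spec_bananas, bananas, bananas_alt]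
  set tl := s.toList with htl
  set text := "banana".toList with htext
  have htextlen : text.length = 6 := by rw [htext]; rfl
  set pairf : Int → Int × Char := fun j => (j, PySem.List.pyGetD tl j '-') with hpairf
  have hmemC : ∀ i ∈ PySem.List.combinations (PySem.List.pyRange 0 (tl.length : Int) 1) text.length,
      i.length = text.length ∧ ∀ j ∈ i, 0 ≤ j ∧ j < (tl.length : Int) := by
    intro i hi
    refine ⟨PySem.List.length_of_mem_combinations hi, ?_⟩
    intro j hj
    have hsub := PySem.List.sublist_of_mem_combinations hi
    exact PySem.List.mem_pyRange_one.mp (hsub.mem hj)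
  have hcong : ∀ i ∈ PySem.List.combinations (PySem.List.pyRange 0 (tl.length : Int) 1) text.length,
      ∀ res : PySem.Set String,
      bananasGo tl text i (List.replicate tl.length '-') 0 res
        = if chk text (i.map pairf) then PySem.Set.add res (maskOf tl i) else res := by
    intro i hi res
    obtain ⟨hlen, hbound⟩ := hmemC i hi
    have hne : i ≠ [] := by intro h; subst h; simp [htextlen] at hlen
    rw [bananasGo_spec tl text i 0 _ res hne (by omega)]
    have hrepl : (List.replicate tl.length '-' : List Char)
        = (PySem.List.pyRange 0 (tl.length : Int) 1).map (fun _ => '-') := by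
      symm
      rw [List.eq_replicate_iff]
      refine ⟨by simp [PySem.List.length_pyRange_one], ?_⟩
      intro b hb
      simp only [List.mem_map] at hb
      obtain ⟨_, _, h⟩ := hb
      exact h.symm
    rw [okFrom_eq_chk tl text i 0 (by omega), hrepl,
        foldl_set_eq_mask tl tl.length i _ hbound]
    rw [hpairf]
    simp [maskOf]
  rw [PySem.List.foldl_congr_mem' _ _ _ _ hcong,
      foldl_add_if (fun i => chk text (List.map pairf i)) (maskOf tl)]
  have hupd : PySem.Set.update PySem.Set.empty
      (((PySem.List.combinations (PySem.List.pyRange 0 (tl.length : Int) 1) text.length).filter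
          (fun i => chk text (List.map pairf i))).map (maskOf tl))
      = PySem.Set.ofList
        (((PySem.List.combinations (PySem.List.pyRange 0 (tl.length : Int) 1) text.length).filter
          (fun i => chk text (List.map pairf i))).map (maskOf tl)) := rfl
  rw [hupd]
  have henum : PySem.List.enumerate tl 0
      = (PySem.List.pyRange 0 (tl.length : Int) 1).map pairf := by
    rw [PySem.List.enumerate_eq_map_pyRange tl '-']
    simp [hpairf]
  rw [findPos_eq_filter, henum, PySem.List.combinations_map, List.filter_map,
      List.map_map, List.map_map]
  congr 1
  apply List.map_congr_left
  intro i _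
  simp [hpairf, Function.comp_def, List.map_map]
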